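-- pv_equiv track=rewrite | github.com/pypi-data/pypi-mirror-270 | packages/field-compression-benchmark/field-compression-benchmark-0.0.3.tar.gz/field-compression-benchmark-0.0.3/fcbench/fcbench/plot.py | _simplify_tokens
-- ===== SOURCE A (Python) =====
-- def _simplify_tokens(tokens: list[list[str]]) -> tuple[str, list[list[str]]]:
--     common = []
--     variables = [[] for _ in tokens]  # noqa: F811
--     variable = 0
--
--     for tokens in zip(*tokens):
--         first = tokens[0]
--         if all(x == first for x in tokens):
--             common.append(first)
--         else:
--             variable += 1
--             common.append(f"#{variable}")
--
--             for t, v in zip(tokens, variables):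
--                 v.append(t)
--
--     return "".join(common), variables
-- ===== SOURCE B (Python) =====
-- def _simplify_tokens(tokens: list[list[str]]) -> tuple[str, list[list[str]]]:
--     if not tokens:
--         return "", []
--     first = tokens[0]
--     n = min(len(r) for r in tokens)
--     # row-major pass: OR-accumulate a boolean difference mask against the first row
--     diff = [False] * n
--     for row in tokens[1:]:
--         diff = [d or a != b for d, a, b in zip(diff, row, first)]
--     common = []
--     k = 0
--     for d, c in zip(diff, first):
--         if d:
--             k += 1
--             common.append(f"#{k}")
--         else:
--             common.append(c)
--     variables = [[t for t, d in zip(row, diff) if d] for row in tokens]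
--     return "".join(common), variables
-- ===== Notes on version B (the rewrite author's own statement) =====
-- stated objective: alternative
-- what changed: A transposes to columns and runs an all-equal scan per column while appending variable entries row-by-row inside that column loop; B never transposes: it makes a row-major pass OR-accumulating a boolean difference mask of each row against the first row, then derives the common string (with #k counters) and each row's variable sublist from that mask.
import Mathlib
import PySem

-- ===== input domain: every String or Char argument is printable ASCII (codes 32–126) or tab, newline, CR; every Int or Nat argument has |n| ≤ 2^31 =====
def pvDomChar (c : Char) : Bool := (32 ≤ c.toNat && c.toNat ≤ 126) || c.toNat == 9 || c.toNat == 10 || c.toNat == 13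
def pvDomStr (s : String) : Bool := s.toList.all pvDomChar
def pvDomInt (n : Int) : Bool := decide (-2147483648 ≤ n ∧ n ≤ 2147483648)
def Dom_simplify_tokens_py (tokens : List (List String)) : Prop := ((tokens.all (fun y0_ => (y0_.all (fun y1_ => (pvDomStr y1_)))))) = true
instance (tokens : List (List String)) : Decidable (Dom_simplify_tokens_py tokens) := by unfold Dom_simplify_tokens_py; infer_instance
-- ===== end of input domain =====

-- B replaces A's column-major all-equal scan with a row-major pass that OR-accumulates a boolean
-- difference mask against the first row, then reads common and variables off the mask
-- (objective: alternative; same cost).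

-- ===== PORT A =====
-- zip(*tokens): the list of columns, truncated to the shortest row
def pvColOf (tokens : List (List String)) (j : Nat) : List String :=
  tokens.map (fun r => r.getD j "")

def pvNumCols (tokens : List (List String)) : Nat :=
  match tokens with
  | [] => 0
  | r :: rs => rs.foldl (fun a r' => min a r'.length) r.length

def pvZipStar (tokens : List (List String)) : List (List String) :=
  (List.range (pvNumCols tokens)).map (pvColOf tokens)

-- A's loop body: state = (common, variables, variable)
def pvStepA (st : List String × List (List String) × Int) (col : List String) :
    List String × List (List String) × Int :=
  let first := col.headD ""
  if col.all (fun x => x == first) then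
    (st.1 ++ [first], st.2.1, st.2.2)
  else
    let v := st.2.2 + 1
    (st.1 ++ ["#" ++ PySem.Int.toStr v],
     List.zipWith (fun t vr => vr ++ [t]) col st.2.1, v)

def simplify_tokens_py (tokens : List (List String)) : String × List (List String) :=
  let res := (pvZipStar tokens).foldl pvStepA ([], tokens.map (fun _ => []), 0)
  (PySem.Str.join "" res.1, res.2.1)

-- ===== PORT B =====
-- diff = [d or a != b for d, a, b in zip(diff, row, first)]
def pvDiffStep (first : List String) (diff : List Bool) (row : List String) : List Bool :=
  List.zipWith (fun d (ab : String × String) => d || ab.1 != ab.2) diff (row.zip first)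

-- the common/counter loop: for d, c in zip(diff, first): …
def pvCommonStep (st : List String × Int) (dc : Bool × String) : List String × Int :=
  if dc.1 then (st.1 ++ ["#" ++ PySem.Int.toStr (st.2 + 1)], st.2 + 1)
  else (st.1 ++ [dc.2], st.2)

def simplify_tokens_py_alt (tokens : List (List String)) : String × List (List String) :=
  match tokens with
  | [] => ("", [])
  | first :: rest =>
    let n := pvNumCols (first :: rest)   -- min(len(r) for r in tokens)
    let diff := rest.foldl (pvDiffStep first) (List.replicate n false)
    let p := (diff.zip first).foldl pvCommonStep ([], 0)
    (PySem.Str.join "" p.1,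
     (first :: rest).map (fun row => ((row.zip diff).filter (fun td => td.2)).map Prod.fst))

-- ===== PRECONDITION & SPEC =====
def Spec_simplify_tokens_py (tokens : List (List String)) (out : String × List (List String)) : Prop := out = simplify_tokens_py_alt tokens
instance (tokens : List (List String)) (out : String × List (List String)) : Decidable (Spec_simplify_tokens_py tokens out) := by unfold Spec_simplify_tokens_py; infer_instance

-- ===== CLAIM (what is proved, stated in full; the proofs are below) =====
def Claim_equal_simplify_tokens_py : Prop := ∀ (tokens : List (List String)), Dom_simplify_tokens_py tokens → Spec_simplify_tokens_py tokens (simplify_tokens_py tokens)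

-- ===== LEMMAS AND PROOFS =====

-- the column-difference predicate both sides compute
def pvQ (first : List String) (rest : List (List String)) (j : Nat) : Bool :=
  rest.any (fun r => r.getD j "" != first.getD j "")

theorem pv_numCols_aux : ∀ (rest : List (List String)) (a : Nat),
    rest.foldl (fun a r' => min a r'.length) a ≤ a ∧
    ∀ r ∈ rest, rest.foldl (fun a r' => min a r'.length) a ≤ r.length := by
  intro rest
  induction rest with
  | nil => intro a; exact ⟨le_refl a, by simp⟩
  | cons r rs ih =>
    intro a
    obtain ⟨h1, h2⟩ := ih (min a r.length)
    refine ⟨le_trans h1 (min_le_left _ _), ?_⟩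
    intro x hx
    rcases List.mem_cons.mp hx with h | h
    · subst h; exact le_trans h1 (min_le_right _ _)
    · exact h2 x h

theorem pv_zipWith_range {α β γ : Type} (g : α → β → γ) (f : Nat → α) (df : β)
    (l : List β) (n : Nat) (h : n ≤ l.length) :
    List.zipWith g ((List.range n).map f) l
      = (List.range n).map (fun j => g (f j) (l.getD j df)) := by
  apply List.ext_getElem
  · simp [h]
  · intro i h1 h2
    have hi : i < n := by simpa using h2
    have hil : i < l.length := lt_of_lt_of_le hi h
    simp [List.getElem_zipWith, List.getD, List.getElem?_eq_getElem hil]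

-- the row-major mask fold computes pvQ pointwise
theorem pv_diff_aux (first : List String) :
    ∀ (rest : List (List String)) (n : Nat) (f : Nat → Bool),
      n ≤ first.length → (∀ r ∈ rest, n ≤ r.length) →
      rest.foldl (pvDiffStep first) ((List.range n).map f)
        = (List.range n).map (fun j => f j || pvQ first rest j) := by
  intro rest
  induction rest with
  | nil => intro n f _ _; simp [pvQ]
  | cons r rs ih =>
    intro n f hf hr
    have hrlen : n ≤ (r.zip first).length := by
      simp [List.length_zip]
      exact ⟨hr r (by simp), hf⟩
    simp only [List.foldl_cons]
    rw [show pvDiffStep first ((List.range n).map f) r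
        = List.zipWith (fun d (ab : String × String) => d || ab.1 != ab.2)
            ((List.range n).map f) (r.zip first) from rfl,
      pv_zipWith_range _ f ("", "") _ n hrlen]
    have hmid : ∀ j < n, ((r.zip first).getD j ("", "")) = (r.getD j "", first.getD j "") := by
      intro j hj
      have h1 : j < r.length := lt_of_lt_of_le hj (hr r (by simp))
      have h2 : j < first.length := lt_of_lt_of_le hj hf
      have hz : j < (r.zip first).length := lt_of_lt_of_le hj hrlen
      simp [List.getD, List.getElem?_eq_getElem hz, List.getElem?_eq_getElem h1,
        List.getElem?_eq_getElem h2, List.getElem_zip]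
    have hcong : (List.range n).map (fun j => f j || (((r.zip first).getD j ("", "")).1 != ((r.zip first).getD j ("", "")).2))
        = (List.range n).map (fun j => (f j || (r.getD j "" != first.getD j ""))) := by
      apply List.map_congr_left
      intro j hj
      rw [hmid j (by simpa using hj)]
    rw [hcong, ih n _ hf (fun x hx => hr x (by simp [hx]))]
    apply List.map_congr_left
    intro j _
    simp [pvQ, Bool.or_assoc]

-- A's all-equal column test is the negation of pvQ
theorem pv_test_eq (first : List String) (rest : List (List String)) (j : Nat) :
    ((pvColOf (first :: rest) j).all (fun x => x == (pvColOf (first :: rest) j).headD ""))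
      = !(pvQ first rest j) := by
  simp only [pvColOf, pvQ, List.map_cons, List.headD_cons, List.all_cons, beq_self_eq_true,
    Bool.true_and, List.all_map]
  rw [show (fun r : List String => r.getD j "" != first.getD j "")
      = (fun r : List String => !(r.getD j "" == first.getD j "")) from rfl,
    ← List.all_eq_not_any_not]
  rfl

-- selection of a row's entries at the variable indices below m
def pvSel (q : Nat → Bool) (row : List String) (m : Nat) : List String :=
  ((List.range m).filter q).map (fun i => row.getD i "")

theorem pv_sel_succ (q : Nat → Bool) (row : List String) (m : Nat) :
    pvSel q row (m + 1) = pvSel q row m ++ (if q m then [row.getD m ""] else []) := by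
  unfold pvSel
  rw [List.range_succ, List.filter_append, List.map_append]
  by_cases h : q m <;> simp [h]

theorem pv_zipWith_map_same {α β γ δ : Type} (f : β → γ → δ) (g : α → β) (h : α → γ) :
    ∀ (l : List α), List.zipWith f (l.map g) (l.map h) = l.map (fun x => f (g x) (h x)) := by
  intro l
  induction l with
  | nil => rfl
  | cons a as ih => simp [ih]

-- main invariant: A's interleaved fold tracks B's common fold plus per-row selections
theorem pv_main (first : List String) (rest : List (List String)) :
    ∀ (k j : Nat) (common : List String) (v : Int),
      ((List.range' j k).map (pvColOf (first :: rest))).foldl pvStepA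
          (common, (first :: rest).map (fun row => pvSel (pvQ first rest) row j), v)
        = (let p := ((List.range' j k).map
              (fun i => (pvQ first rest i, first.getD i ""))).foldl pvCommonStep (common, v)
           (p.1, (first :: rest).map (fun row => pvSel (pvQ first rest) row (j + k)), p.2)) := by
  intro k
  induction k with
  | zero => intro j common v; rfl
  | succ m ih =>
    intro j common v
    rw [List.range'_succ]
    simp only [List.map_cons, List.foldl_cons]
    have hhead : (pvColOf (first :: rest) j).headD "" = first.getD j "" := rfl
    have htest := pv_test_eq first rest j
    by_cases hq : pvQ first rest j
    · have hA : ((pvColOf (first :: rest) j).all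
          (fun x => x == first.getD j "")) = false := by
        rw [← hhead, htest, hq]; rfl
      simp only [pvStepA, pvCommonStep, hhead, hA, hq, Bool.false_eq_true, if_false, if_true]
      have hvars : List.zipWith (fun t vr => vr ++ [t]) (pvColOf (first :: rest) j)
            ((first :: rest).map (fun row => pvSel (pvQ first rest) row j))
          = (first :: rest).map (fun row => pvSel (pvQ first rest) row (j + 1)) := by
        rw [pvColOf, pv_zipWith_map_same]
        apply List.map_congr_left
        intro row _
        rw [pv_sel_succ, hq]
        simp
      simp only [List.map_cons] at hvars ih ⊢
      rw [hvars, ih (j + 1)]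
      simp only [show j + 1 + m = j + (m + 1) from by omega]
    · have hA : ((pvColOf (first :: rest) j).all
          (fun x => x == first.getD j "")) = true := by
        rw [← hhead, htest]; simp [hq]
      rw [Bool.not_eq_true] at hq
      simp only [pvStepA, pvCommonStep, hhead, hA, hq, if_true, Bool.false_eq_true, if_false]
      have hvars : (first :: rest).map (fun row => pvSel (pvQ first rest) row j)
          = (first :: rest).map (fun row => pvSel (pvQ first rest) row (j + 1)) := by
        apply List.map_congr_left
        intro row _
        rw [pv_sel_succ, hq]
        simp
      simp only [List.map_cons] at hvars ih ⊢
      rw [hvars, ih (j + 1)]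
      simp only [show j + 1 + m = j + (m + 1) from by omega]

theorem pv_filter_zip (q : Nat → Bool) (row : List String) (n : Nat) (h : n ≤ row.length) :
    ((row.zip ((List.range n).map q)).filter (fun td => td.2)).map Prod.fst
      = pvSel q row n := by
  have hz : row.zip ((List.range n).map q)
      = (List.range n).map (fun j => (row.getD j "", q j)) := by
    apply List.ext_getElem
    · simp [h]
    · intro i h1 h2
      have hi : i < n := by simpa using h2
      have hil : i < row.length := lt_of_lt_of_le hi h
      simp [List.getElem_zip, List.getD, List.getElem?_eq_getElem hil]
  rw [hz, List.filter_map, List.map_map]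
  rfl

-- ===== VERDICT (by name: the statement is the Claim_ definition above) =====
theorem simplify_tokens_py_spec : Claim_equal_simplify_tokens_py := by
  intro tokens _
  unfold Spec_simplify_tokens_py
  cases tokens with
  | nil => rfl
  | cons first rest =>
    obtain ⟨hf, hr⟩ := pv_numCols_aux rest first.length
    have hf : pvNumCols (first :: rest) ≤ first.length := hf
    have hr : ∀ r ∈ rest, pvNumCols (first :: rest) ≤ r.length := hr
    have hdiff : rest.foldl (pvDiffStep first) (List.replicate (pvNumCols (first :: rest)) false)
        = (List.range (pvNumCols (first :: rest))).map (pvQ first rest) := by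
      rw [show List.replicate (pvNumCols (first :: rest)) false
          = (List.range (pvNumCols (first :: rest))).map (fun _ => false) from by
        rw [List.map_const', List.length_range],
        pv_diff_aux first rest _ _ hf hr]
      simp
    have hzipdiff : ((List.range (pvNumCols (first :: rest))).map (pvQ first rest)).zip first
        = (List.range (pvNumCols (first :: rest))).map
            (fun j => (pvQ first rest j, first.getD j "")) :=
      pv_zipWith_range Prod.mk (pvQ first rest) "" first _ hf
    unfold simplify_tokens_py simplify_tokens_py_alt pvZipStar
    simp only [hdiff, hzipdiff]
    have h0 : (first :: rest).map (fun _ => ([] : List String))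
        = (first :: rest).map (fun row => pvSel (pvQ first rest) row 0) := by
      simp [pvSel]
    rw [h0, List.range_eq_range', pv_main first rest (pvNumCols (first :: rest)) 0 [] 0]
    simp only [← List.range_eq_range', Nat.zero_add]
    have hvars : (first :: rest).map (fun row =>
          ((row.zip ((List.range (pvNumCols (first :: rest))).map (pvQ first rest))).filter
            (fun td => td.2)).map Prod.fst)
        = (first :: rest).map (fun row => pvSel (pvQ first rest) row (pvNumCols (first :: rest))) := by
      apply List.map_congr_left
      intro row hrow
      apply pv_filter_zip
      rcases List.mem_cons.mp hrow with h | h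
      · subst h; exact hf
      · exact hr row h
    rw [hvars]
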